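-- pv_equiv track=rewrite | github.com/openEOPlatform/parcel-delineation | segmentation_core.py | computeWindowLists
-- ===== SOURCE A (Python) =====
-- def computeWindowLists(bboxWindow, imageSize, windowsize, stride):
--     '''
--     bboxWindow: ((xmin,xmax),(ymin,ymax)) or None to use full image
--     imageSize: (width,height)
--     windowSize: size of blocks to split bboxWindow
--     stride: overlaps width neighbours
--
--     returns: 2d list of windows, where each window element is in the format ((xmin,xmax),(ymin,ymax))
--     '''
--     if bboxWindow is None:  bbox=[0,0,imageSize[0],imageSize[1]]
--     else: bbox=[bboxWindow[0][0],bboxWindow[1][0],bboxWindow[0][1],bboxWindow[1][1]]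
--
--     # because sride amount of frame is not filled in the wind with windowsize -> bbox has to be enlarged
--     bbox[0]= bbox[0]-stride if bbox[0]-stride>=0 else 0
--     bbox[1]= bbox[1]-stride if bbox[1]-stride>=0 else 0
--     bbox[2]= bbox[2]+stride if bbox[2]+stride<=imageSize[0] else imageSize[0]
--     bbox[3]= bbox[3]+stride if bbox[3]+stride<=imageSize[1] else imageSize[1]
--
--     # We need to check if we're at the end of the master image
--     # We have to make sure we have a full subtile
--     # so we need to expand such tile and the resulting overlap
--     # with previous subtile is not an issue
--     windowlist=[]
--     for xStart in range(bbox[0], bbox[2], windowsize - 2 * stride):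
--
--         windowlist.append([])
--
--         if xStart + windowsize > bbox[2]:
--             xStart = bbox[2] - windowsize
--             xEnd = bbox[2]
--         else:
--             xEnd = xStart + windowsize
--
--         for yStart in range(bbox[1], bbox[3], windowsize - 2 * stride):
--             if yStart + windowsize > bbox[3]:
--                 yStart = bbox[3] - windowsize
--                 yEnd = bbox[3]
--             else:
--                 yEnd = yStart + windowsize
--
--             windowlist[len(windowlist)-1].append(((xStart, xEnd), (yStart, yEnd)))
--
--             if (yEnd==bbox[3]): break
--         if (xEnd==bbox[2]): break
--
--     return windowlist
-- ===== SOURCE B (Python) =====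
-- def _intervals(start, end, windowsize, step):
--     ivs = []
--     for s in range(start, end, step):
--         if s + windowsize > end:
--             ivs.append((end - windowsize, end))
--             break
--         ivs.append((s, s + windowsize))
--         if s + windowsize == end:
--             break
--     return ivs
--
-- def computeWindowLists(bboxWindow, imageSize, windowsize, stride):
--     if bboxWindow is None:
--         x0, y0, x1, y1 = 0, 0, imageSize[0], imageSize[1]
--     else:
--         (x0, x1), (y0, y1) = bboxWindow
--     x0 = max(x0 - stride, 0)
--     y0 = max(y0 - stride, 0)
--     x1 = min(x1 + stride, imageSize[0])
--     y1 = min(y1 + stride, imageSize[1])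
--     step = windowsize - 2 * stride
--     xIvs = _intervals(x0, x1, windowsize, step)
--     yIvs = _intervals(y0, y1, windowsize, step)
--     return [[(xi, yi) for yi in yIvs] for xi in xIvs]
-- ===== Notes on version B (the rewrite author's own statement) =====
-- stated objective: simpler
-- what changed: B factors the tiling into a single 1D interval-builder called once per axis and forms the grid as a product of the two interval lists, instead of A's nested loops that recompute the y-intervals (with clamp-and-break logic inlined) for every column.
import Mathlib
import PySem

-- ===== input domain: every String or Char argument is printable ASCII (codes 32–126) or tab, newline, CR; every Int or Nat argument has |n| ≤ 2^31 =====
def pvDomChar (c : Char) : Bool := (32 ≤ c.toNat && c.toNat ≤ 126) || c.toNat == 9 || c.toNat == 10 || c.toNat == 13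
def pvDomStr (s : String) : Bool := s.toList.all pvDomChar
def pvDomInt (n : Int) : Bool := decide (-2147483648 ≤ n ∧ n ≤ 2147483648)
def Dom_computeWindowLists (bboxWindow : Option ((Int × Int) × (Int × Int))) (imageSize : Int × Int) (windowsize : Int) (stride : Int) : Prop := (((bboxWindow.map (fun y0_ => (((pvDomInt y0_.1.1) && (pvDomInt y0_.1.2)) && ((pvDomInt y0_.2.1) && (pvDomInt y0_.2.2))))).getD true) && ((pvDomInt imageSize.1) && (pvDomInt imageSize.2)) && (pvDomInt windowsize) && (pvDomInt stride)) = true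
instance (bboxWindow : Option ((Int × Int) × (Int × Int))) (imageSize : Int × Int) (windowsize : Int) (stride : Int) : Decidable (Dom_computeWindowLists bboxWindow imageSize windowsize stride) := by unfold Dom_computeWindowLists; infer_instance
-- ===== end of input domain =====

-- B replaces A's nested clamp-and-break loops by one 1D interval builder used once per axis
-- plus a cartesian product; objective: simpler decomposition (same output, same cost).


-- ===== PORT A =====
-- number of iterations of `for v in range(a, b, step)` (Python's range is lazy; both
-- ports iterate it lazily with this count, exact for step ≠ 0)
def pvRangeLen (a b step : Int) : Nat :=
  if step > 0 then (if a < b then ((b - a + step - 1).fdiv step).toNat else 0)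
  else (if b < a then ((a - b - step - 1).fdiv (-step)).toNat else 0)

-- inner y loop of A: for yStart in range(...), clamp, append ((xS,xE),(yStart,yEnd)), break if yEnd==b3
def pvInnerA (xS xE windowsize b3 step : Int) : Nat → Int → List ((Int × Int) × (Int × Int))
  | 0, _ => []
  | n + 1, y =>
    if y + windowsize > b3 then
      [((xS, xE), (b3 - windowsize, b3))]
    else
      ((xS, xE), (y, y + windowsize)) ::
        (if y + windowsize = b3 then [] else pvInnerA xS xE windowsize b3 step n (y + step))

-- outer x loop of A: clamp xStart/xEnd, run the inner loop over the full y range, break if xEnd==b2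
def pvOuterA (windowsize b1 b2 b3 step : Int) (yn : Nat) : Nat → Int → List (List ((Int × Int) × (Int × Int)))
  | 0, _ => []
  | n + 1, x =>
    if x + windowsize > b2 then
      [pvInnerA (b2 - windowsize) b2 windowsize b3 step yn b1]
    else
      pvInnerA x (x + windowsize) windowsize b3 step yn b1 ::
        (if x + windowsize = b2 then [] else pvOuterA windowsize b1 b2 b3 step yn n (x + step))

def computeWindowLists (bboxWindow : Option ((Int × Int) × (Int × Int))) (imageSize : Int × Int) (windowsize : Int) (stride : Int) : List (List ((Int × Int) × (Int × Int))) :=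
  let bbox0 : Int := match bboxWindow with | none => 0 | some b => b.1.1
  let bbox1 : Int := match bboxWindow with | none => 0 | some b => b.2.1
  let bbox2 : Int := match bboxWindow with | none => imageSize.1 | some b => b.1.2
  let bbox3 : Int := match bboxWindow with | none => imageSize.2 | some b => b.2.2
  let b0 := if bbox0 - stride ≥ 0 then bbox0 - stride else 0
  let b1 := if bbox1 - stride ≥ 0 then bbox1 - stride else 0
  let b2 := if bbox2 + stride ≤ imageSize.1 then bbox2 + stride else imageSize.1
  let b3 := if bbox3 + stride ≤ imageSize.2 then bbox3 + stride else imageSize.2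
  let step := windowsize - 2 * stride
  pvOuterA windowsize b1 b2 b3 step (pvRangeLen b1 b3 step) (pvRangeLen b0 b2 step) b0

-- ===== PORT B =====
-- B's 1D helper: intervals over one axis (same clamp/break rule, producing bare pairs)
def pvIntervals (windowsize endv step : Int) : Nat → Int → List (Int × Int)
  | 0, _ => []
  | n + 1, s =>
    if s + windowsize > endv then
      [(endv - windowsize, endv)]
    else
      (s, s + windowsize) ::
        (if s + windowsize = endv then [] else pvIntervals windowsize endv step n (s + step))

def computeWindowLists_alt (bboxWindow : Option ((Int × Int) × (Int × Int))) (imageSize : Int × Int) (windowsize : Int) (stride : Int) : List (List ((Int × Int) × (Int × Int))) :=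
  let p := match bboxWindow with
    | none => ((0, 0), (imageSize.1, imageSize.2))
    | some ((x0, x1), (y0, y1)) => ((x0, y0), (x1, y1))
  let x0 := max (p.1.1 - stride) 0
  let y0 := max (p.1.2 - stride) 0
  let x1 := min (p.2.1 + stride) imageSize.1
  let y1 := min (p.2.2 + stride) imageSize.2
  let step := windowsize - 2 * stride
  let xIvs := pvIntervals windowsize x1 step (pvRangeLen x0 x1 step) x0
  let yIvs := pvIntervals windowsize y1 step (pvRangeLen y0 y1 step) y0
  xIvs.map (fun xi => yIvs.map (fun yi => (xi, yi)))

-- ===== PRECONDITION & SPEC =====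
-- Pre_ excludes exactly the step windowsize-2*stride = 0, where Python's range raises ValueError.
def Pre_computeWindowLists (bboxWindow : Option ((Int × Int) × (Int × Int))) (imageSize : Int × Int) (windowsize : Int) (stride : Int) : Prop := windowsize ≠ 2 * stride
instance (bboxWindow : Option ((Int × Int) × (Int × Int))) (imageSize : Int × Int) (windowsize : Int) (stride : Int) : Decidable (Pre_computeWindowLists bboxWindow imageSize windowsize stride) := by unfold Pre_computeWindowLists; infer_instance
def pvWitness_computeWindowLists : (Option ((Int × Int) × (Int × Int))) × (Int × Int) × Int × Int := (none, (10, 10), 4, 1)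

def Spec_computeWindowLists (bboxWindow : Option ((Int × Int) × (Int × Int))) (imageSize : Int × Int) (windowsize : Int) (stride : Int) (out : List (List ((Int × Int) × (Int × Int)))) : Prop := out = computeWindowLists_alt bboxWindow imageSize windowsize stride
instance (bboxWindow : Option ((Int × Int) × (Int × Int))) (imageSize : Int × Int) (windowsize : Int) (stride : Int) (out : List (List ((Int × Int) × (Int × Int)))) : Decidable (Spec_computeWindowLists bboxWindow imageSize windowsize stride out) := by unfold Spec_computeWindowLists; infer_instance

-- ===== CLAIM (what is proved, stated in full; the proofs are below) =====
def Claim_equal_computeWindowLists : Prop := ∀ (bboxWindow : Option ((Int × Int) × (Int × Int))) (imageSize : Int × Int) (windowsize : Int) (stride : Int), Dom_computeWindowLists bboxWindow imageSize windowsize stride → Pre_computeWindowLists bboxWindow imageSize windowsize stride → Spec_computeWindowLists bboxWindow imageSize windowsize stride (computeWindowLists bboxWindow imageSize windowsize stride)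

-- ===== LEMMAS AND PROOFS =====
-- A's inner y loop is B's 1D interval list tagged with the fixed x interval
theorem pvInnerA_eq_map (xS xE windowsize b3 step : Int) (n : Nat) (y : Int) :
    pvInnerA xS xE windowsize b3 step n y = (pvIntervals windowsize b3 step n y).map (fun yi => ((xS, xE), yi)) := by
  induction n generalizing y with
  | zero => rfl
  | succ n ih =>
    simp only [pvInnerA, pvIntervals]
    split_ifs with h1 h2 <;> simp [ih]

-- A's outer x loop is the product of B's two interval lists
theorem pvOuterA_eq_map (windowsize b1 b2 b3 step : Int) (yn n : Nat) (x : Int) :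
    pvOuterA windowsize b1 b2 b3 step yn n x =
      (pvIntervals windowsize b2 step n x).map
        (fun xi => (pvIntervals windowsize b3 step yn b1).map (fun yi => (xi, yi))) := by
  induction n generalizing x with
  | zero => rfl
  | succ n ih =>
    simp only [pvOuterA, pvIntervals]
    split_ifs with h1 h2 <;> simp [ih, pvInnerA_eq_map]

-- ===== VERDICT (by name: the statement is the Claim_ definition above) =====
theorem computeWindowLists_spec : Claim_equal_computeWindowLists := by
  intro bboxWindow imageSize windowsize stride _ _
  have hmax : ∀ a : Int, (if a ≥ 0 then a else 0) = max a 0 := by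
    intro a; rw [max_def]; split_ifs <;> omega
  have hmin : ∀ a b : Int, (if a ≤ b then a else b) = min a b := by
    intro a b; rw [min_def]
  unfold Spec_computeWindowLists computeWindowLists computeWindowLists_alt
  cases bboxWindow with
  | none =>
    dsimp only
    rw [pvOuterA_eq_map]; simp only [hmax, hmin]
  | some b =>
    obtain ⟨⟨x0, x1⟩, ⟨y0, y1⟩⟩ := b
    dsimp only
    rw [pvOuterA_eq_map]; simp only [hmax, hmin]
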